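-- pv_equiv track=rewrite | github.com/Alex4124/quizzart | interactive_templates/definitions/wheel_of_fortune.py | _wheel_sector_fills
-- ===== SOURCE A (Python) =====
-- def _wheel_sector_fills(count: int) -> list[str]:
--     palette = ["#c11755", "#aa7af1", "#ff9368", "#7d44c8", "#62bdf5"]
--     if count <= 0:
--         return []
--     if len(palette) == 1:
--         return palette * count
--
--     period = (len(palette) * 2) - 2
--     fills: list[str] = []
--     for index in range(count):
--         palette_index = index % period
--         if palette_index >= len(palette):
--             palette_index = period - palette_index
--         fills.append(palette[palette_index])
--     return fills
-- ===== SOURCE B (Python) =====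
-- def _wheel_sector_fills(count: int) -> list[str]:
--     palette = ["#c11755", "#aa7af1", "#ff9368", "#7d44c8", "#62bdf5"]
--     if count <= 0:
--         return []
--     pattern = palette + palette[-2:0:-1]
--     reps = -(-count // len(pattern))  # ceil(count / len(pattern))
--     return (pattern * reps)[:count]
-- ===== Notes on version B (the rewrite author's own statement) =====
-- stated objective: faster
-- what changed: B has no per-element loop at all: it builds the zigzag period once (palette + reversed interior slice), replicates that whole block ceil(count/8) times by list multiplication, and truncates to count with a slice, instead of A's Python-level pass over range(count) computing a modulo+reflection index per element.
import Mathlib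
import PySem

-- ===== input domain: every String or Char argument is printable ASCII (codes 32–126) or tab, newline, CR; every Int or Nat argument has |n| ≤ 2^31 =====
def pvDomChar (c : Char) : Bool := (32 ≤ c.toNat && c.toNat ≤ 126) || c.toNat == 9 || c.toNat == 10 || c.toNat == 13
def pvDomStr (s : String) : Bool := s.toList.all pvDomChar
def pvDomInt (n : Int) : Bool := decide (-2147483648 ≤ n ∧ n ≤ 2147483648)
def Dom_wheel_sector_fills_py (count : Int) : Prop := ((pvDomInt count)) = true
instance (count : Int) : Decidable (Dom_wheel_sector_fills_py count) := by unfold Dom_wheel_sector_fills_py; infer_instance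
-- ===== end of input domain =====

-- B builds the zigzag period once, replicates that whole block ceil(count/8) times by list
-- multiplication and truncates to count — no per-element index computation (objective: alternative).

-- ===== PORT A =====
def wheel_sector_fills_py (count : Int) : List String :=
  let palette : List String := ["#c11755", "#aa7af1", "#ff9368", "#7d44c8", "#62bdf5"]
  if count ≤ 0 then []
  else if palette.length = 1 then (List.replicate count.toNat palette).flatten
  else
    let period : Int := ((palette.length : Int) * 2) - 2
    (PySem.List.pyRange 0 count 1).foldl
      (fun fills index =>
        let palette_index := PySem.Int.mod index period
        let palette_index :=
          if palette_index ≥ (palette.length : Int) then period - palette_index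
          else palette_index
        fills ++ [PySem.List.pyGetD palette palette_index ""]) []

-- ===== PORT B =====
def wheel_sector_fills_py_alt (count : Int) : List String :=
  let palette : List String := ["#c11755", "#aa7af1", "#ff9368", "#7d44c8", "#62bdf5"]
  if count ≤ 0 then []
  else
    -- palette[-2:0:-1]; slice? is none only for step 0, so getD [] is never the default here
    let pattern := palette ++ (PySem.List.slice? palette (some (-2)) (some 0) (-1)).getD []
    let reps : Int := -(PySem.Int.floordiv (-count) (pattern.length : Int))
    PySem.List.slice (PySem.List.pyRepeat pattern reps) none (some count)

-- ===== PRECONDITION & SPEC =====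
def Spec_wheel_sector_fills_py (count : Int) (out : List String) : Prop := out = wheel_sector_fills_py_alt count
instance (count : Int) (out : List String) : Decidable (Spec_wheel_sector_fills_py count out) := by unfold Spec_wheel_sector_fills_py; infer_instance

-- ===== CLAIM (what is proved, stated in full; the proofs are below) =====
def Claim_equal_wheel_sector_fills_py : Prop := ∀ (count : Int), Dom_wheel_sector_fills_py count → Spec_wheel_sector_fills_py count (wheel_sector_fills_py count)

-- ===== LEMMAS AND PROOFS =====

-- the full 8-element zigzag period, as a literal
def pvPat8 : List String :=
  ["#c11755", "#aa7af1", "#ff9368", "#7d44c8", "#62bdf5", "#7d44c8", "#ff9368", "#aa7af1"]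

-- a flattened replication of the period is the mod-8 lookup table over its index range
theorem pv_flatten_rep (k : Nat) :
    (List.replicate k pvPat8).flatten
      = (List.range (8 * k)).map (fun j => pvPat8[j % 8]?.getD "") := by
  induction k with
  | zero => simp
  | succ k ih =>
    rw [List.replicate_succ', List.flatten_append, ih,
        show 8 * (k + 1) = 8 * k + 8 by ring, List.range_add, List.map_append]
    congr 1
    simp only [List.flatten_cons, List.flatten_nil, List.append_nil, List.map_map]
    have step : List.map ((fun j => pvPat8[j % 8]?.getD "") ∘ fun x => 8 * k + x) (List.range 8)
        = List.map (fun j => pvPat8[j % 8]?.getD "") (List.range 8) := by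
      refine List.map_congr_left ?_
      intro j hj
      show pvPat8[(8 * k + j) % 8]?.getD "" = pvPat8[j % 8]?.getD ""
      rw [Nat.mul_add_mod]
    rw [step]
    simp [pvPat8, List.range_succ]

-- A, for positive count, is the mod-8 lookup table over range(count)
theorem pv_flatten_map_singleton (l : List Int) (f : Int → String) :
    (l.map (fun x => [f x])).flatten = l.map f := by
  induction l with
  | nil => rfl
  | cons a t ih => simp [ih]

theorem pv_point2 (j : Nat) :
    PySem.List.pyGetD ["#c11755", "#aa7af1", "#ff9368", "#7d44c8", "#62bdf5"]
      (if 5 ≤ (0 + (j : Int)) % 8 then 8 - (0 + (j : Int)) % 8 else (0 + (j : Int)) % 8) ""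
    = pvPat8[j % 8]?.getD "" := by
  have hm : (0 + (j : Int)) % 8 = ((j % 8 : Nat) : Int) := by omega
  rw [hm]
  have h8 : j % 8 < 8 := Nat.mod_lt _ (by omega)
  set m := j % 8 with hmdef
  have : m = 0 ∨ m = 1 ∨ m = 2 ∨ m = 3 ∨ m = 4 ∨ m = 5 ∨ m = 6 ∨ m = 7 := by omega
  rcases this with h | h | h | h | h | h | h | h <;> rw [h] <;> decide

theorem pv_A_eq (count : Int) (hc : ¬ count ≤ 0) :
    wheel_sector_fills_py count
      = (List.range count.toNat).map (fun j => pvPat8[j % 8]?.getD "") := by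
  unfold wheel_sector_fills_py
  simp only [if_neg hc, List.length_cons, List.length_nil]
  norm_num
  rw [pv_flatten_map_singleton, PySem.List.pyRange_one, List.map_map]
  simp only [Int.sub_zero]
  refine List.map_congr_left ?_
  intro j hj
  exact pv_point2 j

-- B, for positive count, is the same table: take count of the replicated period
theorem pv_B_eq (count : Int) (hc : ¬ count ≤ 0) :
    wheel_sector_fills_py_alt count
      = (List.range count.toNat).map (fun j => pvPat8[j % 8]?.getD "") := by
  unfold wheel_sector_fills_py_alt
  simp only [if_neg hc]
  have hpat : (["#c11755", "#aa7af1", "#ff9368", "#7d44c8", "#62bdf5"] : List String) ++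
      (PySem.List.slice? ["#c11755", "#aa7af1", "#ff9368", "#7d44c8", "#62bdf5"]
        (some (-2)) (some 0) (-1)).getD [] = pvPat8 := by decide
  rw [hpat]
  have hlen : ((pvPat8.length : Int)) = 8 := by decide
  rw [hlen]
  have hr : PySem.Int.floordiv (-count) 8 = (-count) / 8 := by
    unfold PySem.Int.floordiv
    rw [Int.fdiv_eq_ediv]
    simp
  rw [hr]
  set r : Int := -(-count / 8) with hrdef
  have hge : count.toNat ≤ 8 * r.toNat := by omega
  rw [PySem.List.slice_to]
  unfold PySem.List.pyRepeat
  rw [pv_flatten_rep, ← List.map_take, List.take_range]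
  rw [show min count.toNat (8 * r.toNat) = count.toNat from by omega]
  all_goals omega

-- ===== VERDICT (by name: the statement is the Claim_ definition above) =====
theorem wheel_sector_fills_py_spec : Claim_equal_wheel_sector_fills_py := by
  intro count _
  unfold Spec_wheel_sector_fills_py
  by_cases hc : count ≤ 0
  · unfold wheel_sector_fills_py wheel_sector_fills_py_alt
    simp only [if_pos hc]
  · rw [pv_A_eq count hc, pv_B_eq count hc]
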